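-- pv_equiv track=rewrite | github.com/ABeGood/open-ai-assistant-test | telegram_bot/formatters.py | restore_preserved_markdown
-- ===== SOURCE A (Python) =====
-- def restore_preserved_markdown(text: str) -> str:
--     """
--     Restore preserved markdown formatting.
--     """
--
--     # Restore replacements
--     replacements = {
--         '<<<BOLD>>>': '*',
--         '<<<ITALIC>>>': '_',
--         '<<<UNDERLINE>>>': '__',
--         '<<<STRIKE>>>': '~',
--         '<<<CODE>>>': '`',
--     }
--
--     for placeholder, original in replacements.items():
--         text = text.replace(placeholder, original)
--
--     return text
-- ===== SOURCE B (Python) =====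
-- # Placeholder tokens and the markdown symbols they stand for.
-- _TOKENS = (
--     ('<<<BOLD>>>', '*'),
--     ('<<<ITALIC>>>', '_'),
--     ('<<<UNDERLINE>>>', '__'),
--     ('<<<STRIKE>>>', '~'),
--     ('<<<CODE>>>', '`'),
-- )
--
--
-- def restore_preserved_markdown(text: str) -> str:
--     """
--     Restore preserved markdown formatting.
--
--     Single left-to-right scan: at each position try the placeholder table;
--     on a hit emit the original symbol and skip the token, otherwise copy
--     the character.  One pass instead of five full replace passes.
--     """
--     out = []
--     i = 0
--     n = len(text)
--     while i < n:
--         for token, symbol in _TOKENS: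
--             if text.startswith(token, i):
--                 out.append(symbol)
--                 i += len(token)
--                 break
--         else:
--             out.append(text[i])
--             i += 1
--     return ''.join(out)
-- ===== Notes on version B (the rewrite author's own statement) =====
-- stated objective: alternative
-- what changed: A makes five sequential full str.replace passes over the text (one per placeholder); B makes a single left-to-right scan that tries the placeholder table at each position, emitting the mapped symbol and skipping the token on a hit.
import Mathlib
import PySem

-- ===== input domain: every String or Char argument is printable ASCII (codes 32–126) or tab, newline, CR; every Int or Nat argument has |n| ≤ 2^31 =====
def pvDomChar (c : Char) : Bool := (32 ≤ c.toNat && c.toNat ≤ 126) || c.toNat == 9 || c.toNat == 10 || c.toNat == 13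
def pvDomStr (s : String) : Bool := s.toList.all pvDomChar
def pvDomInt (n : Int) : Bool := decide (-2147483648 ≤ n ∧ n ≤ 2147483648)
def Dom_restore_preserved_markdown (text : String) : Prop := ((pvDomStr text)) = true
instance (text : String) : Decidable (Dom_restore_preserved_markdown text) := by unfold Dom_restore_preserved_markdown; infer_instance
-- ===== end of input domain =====

set_option maxRecDepth 8192


-- B replaces A's five sequential full replace passes by a single left-to-right scan
-- dispatching on the placeholder table (objective: alternative single-pass structure).

-- ===== PORT A =====
-- A: a dict of five placeholder → symbol pairs, then a loop of text.replace calls.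
def restore_preserved_markdown (text : String) : String :=
  let replacements : PySem.Dict String String := PySem.Dict.mk
    [("<<<BOLD>>>", "*"), ("<<<ITALIC>>>", "_"), ("<<<UNDERLINE>>>", "__"),
     ("<<<STRIKE>>>", "~"), ("<<<CODE>>>", "`")]
  replacements.items.foldl (fun t p => PySem.Str.replace t p.1 p.2) text

-- ===== PORT B =====
-- B-side helpers: the placeholder tokens as character lists.
def pvTokBOLD : List Char := ['<','<','<','B','O','L','D','>','>','>']
def pvTokITALIC : List Char := ['<','<','<','I','T','A','L','I','C','>','>','>']
def pvTokUNDERLINE : List Char := ['<','<','<','U','N','D','E','R','L','I','N','E','>','>','>']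
def pvTokSTRIKE : List Char := ['<','<','<','S','T','R','I','K','E','>','>','>']
def pvTokCODE : List Char := ['<','<','<','C','O','D','E','>','>','>']

-- Source B's while loop: at each position try the placeholders in table order
-- (text.startswith(placeholder, i)); on a hit emit the symbol and skip the token,
-- otherwise copy the character.
def pvAltGo : List Char → List Char
  | [] => []
  | c :: t =>
    if pvTokBOLD.isPrefixOf (c :: t) then '*' :: pvAltGo ((c :: t).drop 10)
    else if pvTokITALIC.isPrefixOf (c :: t) then '_' :: pvAltGo ((c :: t).drop 12)
    else if pvTokUNDERLINE.isPrefixOf (c :: t) then '_' :: '_' :: pvAltGo ((c :: t).drop 15)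
    else if pvTokSTRIKE.isPrefixOf (c :: t) then '~' :: pvAltGo ((c :: t).drop 12)
    else if pvTokCODE.isPrefixOf (c :: t) then '`' :: pvAltGo ((c :: t).drop 10)
    else c :: pvAltGo t
termination_by l => l.length
decreasing_by all_goals (simp [List.length_drop]; try omega)

def restore_preserved_markdown_alt (text : String) : String :=
  String.ofList (pvAltGo text.toList)

-- ===== PRECONDITION & SPEC =====
def Spec_restore_preserved_markdown (text : String) (out : String) : Prop := out = restore_preserved_markdown_alt text
instance (text : String) (out : String) : Decidable (Spec_restore_preserved_markdown text out) := by unfold Spec_restore_preserved_markdown; infer_instance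

-- ===== CLAIM (what is proved, stated in full; the proofs are below) =====
def Claim_equal_restore_preserved_markdown : Prop := ∀ (text : String), Dom_restore_preserved_markdown text → Spec_restore_preserved_markdown text (restore_preserved_markdown text)

-- ===== LEMMAS AND PROOFS =====

-- A simple structural form of one Python str.replace pass with nonempty pattern o0 :: orest.
def pvRepl (o0 : Char) (orest new : List Char) : List Char → List Char
  | [] => []
  | c :: t =>
    if (o0 :: orest).isPrefixOf (c :: t) then new ++ pvRepl o0 orest new (t.drop orest.length)
    else c :: pvRepl o0 orest new t
termination_by l => l.length
decreasing_by all_goals (simp [List.length_drop]; try omega)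

theorem pvRepl_nil (o0 : Char) (orest new : List Char) : pvRepl o0 orest new [] = [] := by
  rw [pvRepl]

theorem pvRepl_cons (o0 : Char) (orest new : List Char) (c : Char) (t : List Char) :
    pvRepl o0 orest new (c :: t) =
      if (o0 :: orest).isPrefixOf (c :: t) then new ++ pvRepl o0 orest new (t.drop orest.length)
      else c :: pvRepl o0 orest new t := by
  rw [pvRepl]

theorem pvGo_spec (o0 : Char) (orest new : List Char) :
    ∀ (fuel : Nat) (l acc : List Char), l.length ≤ fuel →
      PySem.Chars.replace.go (o0 :: orest) new fuel l acc = acc.reverse ++ pvRepl o0 orest new l := by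
  intro fuel
  induction fuel with
  | zero =>
    intro l acc hl
    have hnil : l = [] := List.eq_nil_of_length_eq_zero (Nat.le_zero.mp hl)
    subst hnil
    rw [PySem.Chars.replace.go, pvRepl_nil]
  | succ fuel ih =>
    intro l acc hl
    cases l with
    | nil =>
      rw [PySem.Chars.replace.go, pvRepl_nil]
      all_goals simp
    | cons c t =>
      rw [PySem.Chars.replace.go, pvRepl_cons]
      by_cases h : (o0 :: orest).isPrefixOf (c :: t) = true
      · rw [if_pos h, if_pos h]
        have hdrop : List.drop (o0 :: orest).length (c :: t) = t.drop orest.length := by simp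
        rw [hdrop, ih _ _ (by simp at hl ⊢; omega)]
        simp
      · rw [if_neg h, if_neg h, ih _ _ (by simp at hl; omega)]
        simp

theorem pvChars_replace_eq (o0 : Char) (orest new : List Char) (s : List Char) :
    PySem.Chars.replace s (o0 :: orest) new = pvRepl o0 orest new s := by
  rw [PySem.Chars.replace]
  have hne : (o0 :: orest).isEmpty = false := rfl
  rw [hne]
  simp only [Bool.false_eq_true, if_false]
  exact (pvGo_spec o0 orest new s.length s [] le_rfl).trans (by simp)

-- Two lists clash when neither is a prefix of the other; then old cannot match at the
-- start of u ++ t for any t.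
def pvClash (old u : List Char) : Bool := !old.isPrefixOf u && !u.isPrefixOf old

theorem pvClash_not_prefix_append {old u : List Char} (h : pvClash old u = true) (t : List Char) :
    ¬ old.isPrefixOf (u ++ t) = true := by
  intro hpre
  simp only [pvClash, Bool.and_eq_true, Bool.not_eq_true'] at h
  obtain ⟨h1, h2⟩ := h
  have hp : old <+: u ++ t := List.isPrefixOf_iff_prefix.mp hpre
  have htake : old = (u ++ t).take old.length := List.prefix_iff_eq_take.mp hp
  rw [List.take_append] at htake
  rcases Nat.le_total old.length u.length with hle | hle
  · have h0 : old.length - u.length = 0 := by omega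
    rw [h0] at htake
    simp only [List.take_zero, List.append_nil] at htake
    have : old <+: u := htake ▸ List.take_prefix _ _
    rw [List.isPrefixOf_iff_prefix.mpr this] at h1
    exact absurd h1 (by simp)
  · rw [List.take_of_length_le hle] at htake
    have : u <+: old := ⟨_, htake.symm⟩
    rw [List.isPrefixOf_iff_prefix.mpr this] at h2
    exact absurd h2 (by simp)

-- A pass whose pattern clashes with every suffix of T copies T unchanged.
theorem pvRepl_passthrough (o0 : Char) (orest new : List Char) (T : List Char)
    (hT : ∀ k, k < T.length → pvClash (o0 :: orest) (T.drop k) = true) :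
    ∀ t, pvRepl o0 orest new (T ++ t) = T ++ pvRepl o0 orest new t := by
  induction T with
  | nil => intro t; simp
  | cons c T ih =>
    intro t
    have h0 := hT 0 (by simp)
    rw [List.drop_zero] at h0
    have hnp : ¬ (o0 :: orest).isPrefixOf (c :: (T ++ t)) = true := by
      rw [← List.cons_append]; exact pvClash_not_prefix_append h0 t
    rw [List.cons_append, pvRepl_cons, if_neg hnp, ih (fun k hk => hT (k+1) (by simp; omega)),
        List.cons_append]

theorem pvRepl_consume (o0 : Char) (orest new t : List Char) :
    pvRepl o0 orest new ((o0 :: orest) ++ t) = new ++ pvRepl o0 orest new t := by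
  have hpre : (o0 :: orest).isPrefixOf (o0 :: (orest ++ t)) = true := by
    rw [← List.cons_append]
    exact List.isPrefixOf_iff_prefix.mpr (List.prefix_append _ _)
  rw [List.cons_append, pvRepl_cons, if_pos hpre, List.drop_left]

theorem pvRepl_cons_ne (o0 : Char) (orest new : List Char) (c : Char) (t : List Char) (h : c ≠ o0) :
    pvRepl o0 orest new (c :: t) = c :: pvRepl o0 orest new t := by
  rw [pvRepl_cons, if_neg]
  simp only [List.isPrefixOf, Bool.and_eq_true, beq_iff_eq]
  intro h'
  exact absurd h'.1.symm h

-- If a pattern suffix u (containing none of the replacement's characters) matches at the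
-- front of a pass's output, it already matched at the front of the pass's input.
theorem pvG (o0 : Char) (orest : List Char) (n0 : Char) (nrest : List Char) :
    ∀ (n : Nat) (u : List Char), (∀ ch ∈ (n0 :: nrest), ch ∉ u) →
    ∀ (x : List Char), x.length ≤ n →
      u.isPrefixOf (pvRepl o0 orest (n0 :: nrest) x) = true → u.isPrefixOf x = true := by
  intro n
  induction n with
  | zero =>
    intro u hd x hx
    have hnil : x = [] := List.eq_nil_of_length_eq_zero (Nat.le_zero.mp hx)
    subst hnil
    rw [pvRepl_nil]; exact id
  | succ n ih =>
    intro u hd x hx hpre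
    cases x with
    | nil => rwa [pvRepl_nil] at hpre
    | cons c t =>
      rw [pvRepl_cons] at hpre
      by_cases h : (o0 :: orest).isPrefixOf (c :: t) = true
      · rw [if_pos h] at hpre
        cases u with
        | nil => rfl
        | cons u0 u' =>
          obtain ⟨w, hw⟩ := List.isPrefixOf_iff_prefix.mp hpre
          rw [List.cons_append, List.cons_append] at hw
          have hu0 : u0 = n0 := by injection hw
          exact absurd (List.mem_cons.mpr (Or.inl hu0.symm)) (hd n0 (by simp))
      · rw [if_neg h] at hpre
        cases u with
        | nil => rfl
        | cons u0 u' =>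
          simp only [List.isPrefixOf, Bool.and_eq_true, beq_iff_eq] at hpre ⊢
          refine ⟨hpre.1, ih u' (fun ch hch hmem => hd ch hch (List.mem_cons.mpr (Or.inr hmem))) t
            (by simp at hx; omega) hpre.2⟩

theorem pvAltGo_nil : pvAltGo [] = [] := by rw [pvAltGo]

theorem pvAltGo_cons (c : Char) (t : List Char) :
    pvAltGo (c :: t) =
      if pvTokBOLD.isPrefixOf (c :: t) then '*' :: pvAltGo ((c :: t).drop 10)
      else if pvTokITALIC.isPrefixOf (c :: t) then '_' :: pvAltGo ((c :: t).drop 12)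
      else if pvTokUNDERLINE.isPrefixOf (c :: t) then '_' :: '_' :: pvAltGo ((c :: t).drop 15)
      else if pvTokSTRIKE.isPrefixOf (c :: t) then '~' :: pvAltGo ((c :: t).drop 12)
      else if pvTokCODE.isPrefixOf (c :: t) then '`' :: pvAltGo ((c :: t).drop 10)
      else c :: pvAltGo t := by
  rw [pvAltGo]

-- tails of the tokens, for use as pvRepl patterns
def pvBOLDr : List Char := ['<','<','B','O','L','D','>','>','>']
def pvITALr : List Char := ['<','<','I','T','A','L','I','C','>','>','>']
def pvUNDr : List Char := ['<','<','U','N','D','E','R','L','I','N','E','>','>','>']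
def pvSTRr : List Char := ['<','<','S','T','R','I','K','E','>','>','>']
def pvCODEr : List Char := ['<','<','C','O','D','E','>','>','>']

-- token identities and consume/drop/AltGo facts, by definitional equality
theorem pvConsB (X : List Char) :
    pvRepl '<' pvBOLDr ['*'] (pvTokBOLD ++ X) = '*' :: pvRepl '<' pvBOLDr ['*'] X :=
  pvRepl_consume '<' pvBOLDr ['*'] X
theorem pvConsI (X : List Char) :
    pvRepl '<' pvITALr ['_'] (pvTokITALIC ++ X) = '_' :: pvRepl '<' pvITALr ['_'] X :=
  pvRepl_consume '<' pvITALr ['_'] X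
theorem pvConsU (X : List Char) :
    pvRepl '<' pvUNDr ['_','_'] (pvTokUNDERLINE ++ X) = '_' :: '_' :: pvRepl '<' pvUNDr ['_','_'] X :=
  pvRepl_consume '<' pvUNDr ['_','_'] X
theorem pvConsS (X : List Char) :
    pvRepl '<' pvSTRr ['~'] (pvTokSTRIKE ++ X) = '~' :: pvRepl '<' pvSTRr ['~'] X :=
  pvRepl_consume '<' pvSTRr ['~'] X
theorem pvConsC (X : List Char) :
    pvRepl '<' pvCODEr ['`'] (pvTokCODE ++ X) = '`' :: pvRepl '<' pvCODEr ['`'] X :=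
  pvRepl_consume '<' pvCODEr ['`'] X

-- pvAltGo consumes a leading token
theorem pvAltGoB (X : List Char) : pvAltGo (pvTokBOLD ++ X) = '*' :: pvAltGo X := by
  have e : pvAltGo (pvTokBOLD ++ X) = pvAltGo ('<' :: (pvBOLDr ++ X)) := rfl
  have hpos : pvTokBOLD.isPrefixOf ('<' :: (pvBOLDr ++ X)) = true :=
    List.isPrefixOf_iff_prefix.mpr ⟨X, rfl⟩
  have hd : List.drop 10 ('<' :: (pvBOLDr ++ X)) = X := List.drop_left' (l₁ := pvTokBOLD) (by decide)
  rw [e, pvAltGo_cons, if_pos hpos, hd]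

theorem pvAltGoI (X : List Char) : pvAltGo (pvTokITALIC ++ X) = '_' :: pvAltGo X := by
  have e : pvAltGo (pvTokITALIC ++ X) = pvAltGo ('<' :: (pvITALr ++ X)) := rfl
  have hB : ¬ pvTokBOLD.isPrefixOf ('<' :: (pvITALr ++ X)) = true := fun hp =>
    pvClash_not_prefix_append (u := pvTokITALIC) (by decide) X hp
  have hpos : pvTokITALIC.isPrefixOf ('<' :: (pvITALr ++ X)) = true :=
    List.isPrefixOf_iff_prefix.mpr ⟨X, rfl⟩
  have hd : List.drop 12 ('<' :: (pvITALr ++ X)) = X := List.drop_left' (l₁ := pvTokITALIC) (by decide)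
  rw [e, pvAltGo_cons, if_neg hB, if_pos hpos, hd]

theorem pvAltGoU (X : List Char) : pvAltGo (pvTokUNDERLINE ++ X) = '_' :: '_' :: pvAltGo X := by
  have e : pvAltGo (pvTokUNDERLINE ++ X) = pvAltGo ('<' :: (pvUNDr ++ X)) := rfl
  have hB : ¬ pvTokBOLD.isPrefixOf ('<' :: (pvUNDr ++ X)) = true := fun hp =>
    pvClash_not_prefix_append (u := pvTokUNDERLINE) (by decide) X hp
  have hI : ¬ pvTokITALIC.isPrefixOf ('<' :: (pvUNDr ++ X)) = true := fun hp =>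
    pvClash_not_prefix_append (u := pvTokUNDERLINE) (by decide) X hp
  have hpos : pvTokUNDERLINE.isPrefixOf ('<' :: (pvUNDr ++ X)) = true :=
    List.isPrefixOf_iff_prefix.mpr ⟨X, rfl⟩
  have hd : List.drop 15 ('<' :: (pvUNDr ++ X)) = X := List.drop_left' (l₁ := pvTokUNDERLINE) (by decide)
  rw [e, pvAltGo_cons, if_neg hB, if_neg hI, if_pos hpos, hd]

theorem pvAltGoS (X : List Char) : pvAltGo (pvTokSTRIKE ++ X) = '~' :: pvAltGo X := by
  have e : pvAltGo (pvTokSTRIKE ++ X) = pvAltGo ('<' :: (pvSTRr ++ X)) := rfl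
  have hB : ¬ pvTokBOLD.isPrefixOf ('<' :: (pvSTRr ++ X)) = true := fun hp =>
    pvClash_not_prefix_append (u := pvTokSTRIKE) (by decide) X hp
  have hI : ¬ pvTokITALIC.isPrefixOf ('<' :: (pvSTRr ++ X)) = true := fun hp =>
    pvClash_not_prefix_append (u := pvTokSTRIKE) (by decide) X hp
  have hU : ¬ pvTokUNDERLINE.isPrefixOf ('<' :: (pvSTRr ++ X)) = true := fun hp =>
    pvClash_not_prefix_append (u := pvTokSTRIKE) (by decide) X hp
  have hpos : pvTokSTRIKE.isPrefixOf ('<' :: (pvSTRr ++ X)) = true :=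
    List.isPrefixOf_iff_prefix.mpr ⟨X, rfl⟩
  have hd : List.drop 12 ('<' :: (pvSTRr ++ X)) = X := List.drop_left' (l₁ := pvTokSTRIKE) (by decide)
  rw [e, pvAltGo_cons, if_neg hB, if_neg hI, if_neg hU, if_pos hpos, hd]

theorem pvAltGoC (X : List Char) : pvAltGo (pvTokCODE ++ X) = '`' :: pvAltGo X := by
  have e : pvAltGo (pvTokCODE ++ X) = pvAltGo ('<' :: (pvCODEr ++ X)) := rfl
  have hB : ¬ pvTokBOLD.isPrefixOf ('<' :: (pvCODEr ++ X)) = true := fun hp =>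
    pvClash_not_prefix_append (u := pvTokCODE) (by decide) X hp
  have hI : ¬ pvTokITALIC.isPrefixOf ('<' :: (pvCODEr ++ X)) = true := fun hp =>
    pvClash_not_prefix_append (u := pvTokCODE) (by decide) X hp
  have hU : ¬ pvTokUNDERLINE.isPrefixOf ('<' :: (pvCODEr ++ X)) = true := fun hp =>
    pvClash_not_prefix_append (u := pvTokCODE) (by decide) X hp
  have hS : ¬ pvTokSTRIKE.isPrefixOf ('<' :: (pvCODEr ++ X)) = true := fun hp =>
    pvClash_not_prefix_append (u := pvTokCODE) (by decide) X hp
  have hpos : pvTokCODE.isPrefixOf ('<' :: (pvCODEr ++ X)) = true :=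
    List.isPrefixOf_iff_prefix.mpr ⟨X, rfl⟩
  have hd : List.drop 10 ('<' :: (pvCODEr ++ X)) = X := List.drop_left' (l₁ := pvTokCODE) (by decide)
  rw [e, pvAltGo_cons, if_neg hB, if_neg hI, if_neg hU, if_neg hS, if_pos hpos, hd]

-- replacement characters never occur in any placeholder tail
theorem pvD1 : ∀ ch ∈ ['*'], ch ∉ pvITALr := by
  intro ch hch; simp only [List.mem_cons, List.not_mem_nil, or_false] at hch; subst hch; decide
theorem pvD2 : ∀ ch ∈ ['_'], ch ∉ pvUNDr := by
  intro ch hch; simp only [List.mem_cons, List.not_mem_nil, or_false] at hch; subst hch; decide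
theorem pvD3 : ∀ ch ∈ ['*'], ch ∉ pvUNDr := by
  intro ch hch; simp only [List.mem_cons, List.not_mem_nil, or_false] at hch; subst hch; decide
theorem pvD4 : ∀ ch ∈ ['_','_'], ch ∉ pvSTRr := by
  intro ch hch; simp only [List.mem_cons, List.not_mem_nil, or_false] at hch
  rcases hch with rfl | rfl <;> decide
theorem pvD5 : ∀ ch ∈ ['_'], ch ∉ pvSTRr := by
  intro ch hch; simp only [List.mem_cons, List.not_mem_nil, or_false] at hch; subst hch; decide
theorem pvD6 : ∀ ch ∈ ['*'], ch ∉ pvSTRr := by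
  intro ch hch; simp only [List.mem_cons, List.not_mem_nil, or_false] at hch; subst hch; decide
theorem pvD7 : ∀ ch ∈ ['~'], ch ∉ pvCODEr := by
  intro ch hch; simp only [List.mem_cons, List.not_mem_nil, or_false] at hch; subst hch; decide
theorem pvD8 : ∀ ch ∈ ['_','_'], ch ∉ pvCODEr := by
  intro ch hch; simp only [List.mem_cons, List.not_mem_nil, or_false] at hch
  rcases hch with rfl | rfl <;> decide
theorem pvD9 : ∀ ch ∈ ['_'], ch ∉ pvCODEr := by
  intro ch hch; simp only [List.mem_cons, List.not_mem_nil, or_false] at hch; subst hch; decide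
theorem pvD10 : ∀ ch ∈ ['*'], ch ∉ pvCODEr := by
  intro ch hch; simp only [List.mem_cons, List.not_mem_nil, or_false] at hch; subst hch; decide

-- The five sequential passes equal the single scan.
theorem pvMain : ∀ (n : Nat) (l : List Char), l.length ≤ n →
    pvRepl '<' pvCODEr ['`'] (pvRepl '<' pvSTRr ['~'] (pvRepl '<' pvUNDr ['_','_']
      (pvRepl '<' pvITALr ['_'] (pvRepl '<' pvBOLDr ['*'] l)))) = pvAltGo l := by
  intro n
  induction n with
  | zero =>
    intro l hl
    have hnil : l = [] := List.eq_nil_of_length_eq_zero (Nat.le_zero.mp hl)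
    subst hnil
    simp [pvRepl_nil, pvAltGo_nil]
  | succ n ih =>
    intro l hl
    cases l with
    | nil => simp [pvRepl_nil, pvAltGo_nil]
    | cons c t =>
      by_cases hb : pvTokBOLD.isPrefixOf (c :: t) = true
      · -- BOLD token at the front
        obtain ⟨u, hu⟩ := List.isPrefixOf_iff_prefix.mp hb
        have hlen : u.length ≤ n := by
          have h' := congrArg List.length hu
          simp [pvTokBOLD] at h'
          simp at hl; omega
        rw [← hu, pvConsB,
            pvRepl_cons_ne _ _ _ _ _ (by decide), pvRepl_cons_ne _ _ _ _ _ (by decide),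
            pvRepl_cons_ne _ _ _ _ _ (by decide), pvRepl_cons_ne _ _ _ _ _ (by decide),
            ih u hlen, pvAltGoB]
      · by_cases hi : pvTokITALIC.isPrefixOf (c :: t) = true
        · -- ITALIC token at the front
          obtain ⟨u, hu⟩ := List.isPrefixOf_iff_prefix.mp hi
          have hlen : u.length ≤ n := by
            have h' := congrArg List.length hu
            simp [pvTokITALIC] at h'
            simp at hl; omega
          rw [← hu, pvRepl_passthrough '<' pvBOLDr ['*'] pvTokITALIC (by decide), pvConsI,
              pvRepl_cons_ne _ _ _ _ _ (by decide), pvRepl_cons_ne _ _ _ _ _ (by decide),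
              pvRepl_cons_ne _ _ _ _ _ (by decide), ih u hlen, pvAltGoI]
        · by_cases hund : pvTokUNDERLINE.isPrefixOf (c :: t) = true
          · -- UNDERLINE token at the front
            obtain ⟨u, hu⟩ := List.isPrefixOf_iff_prefix.mp hund
            have hlen : u.length ≤ n := by
              have h' := congrArg List.length hu
              simp [pvTokUNDERLINE] at h'
              simp at hl; omega
            rw [← hu, pvRepl_passthrough '<' pvBOLDr ['*'] pvTokUNDERLINE (by decide),
                pvRepl_passthrough '<' pvITALr ['_'] pvTokUNDERLINE (by decide), pvConsU,
                pvRepl_cons_ne _ _ _ _ _ (by decide), pvRepl_cons_ne _ _ _ _ _ (by decide),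
                pvRepl_cons_ne _ _ _ _ _ (by decide), pvRepl_cons_ne _ _ _ _ _ (by decide),
                ih u hlen, pvAltGoU]
          · by_cases hs : pvTokSTRIKE.isPrefixOf (c :: t) = true
            · -- STRIKE token at the front
              obtain ⟨u, hu⟩ := List.isPrefixOf_iff_prefix.mp hs
              have hlen : u.length ≤ n := by
                have h' := congrArg List.length hu
                simp [pvTokSTRIKE] at h'
                simp at hl; omega
              rw [← hu, pvRepl_passthrough '<' pvBOLDr ['*'] pvTokSTRIKE (by decide),
                  pvRepl_passthrough '<' pvITALr ['_'] pvTokSTRIKE (by decide),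
                  pvRepl_passthrough '<' pvUNDr ['_','_'] pvTokSTRIKE (by decide), pvConsS,
                  pvRepl_cons_ne _ _ _ _ _ (by decide), ih u hlen, pvAltGoS]
            · by_cases hc : pvTokCODE.isPrefixOf (c :: t) = true
              · -- CODE token at the front
                obtain ⟨u, hu⟩ := List.isPrefixOf_iff_prefix.mp hc
                have hlen : u.length ≤ n := by
                  have h' := congrArg List.length hu
                  simp [pvTokCODE] at h'
                  simp at hl; omega
                rw [← hu, pvRepl_passthrough '<' pvBOLDr ['*'] pvTokCODE (by decide),
                    pvRepl_passthrough '<' pvITALr ['_'] pvTokCODE (by decide),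
                    pvRepl_passthrough '<' pvUNDr ['_','_'] pvTokCODE (by decide),
                    pvRepl_passthrough '<' pvSTRr ['~'] pvTokCODE (by decide), pvConsC,
                    ih u hlen, pvAltGoC]
              · -- no token matches at the front: every pass copies c
                have e1 : pvRepl '<' pvBOLDr ['*'] (c :: t) = c :: pvRepl '<' pvBOLDr ['*'] t := by
                  rw [pvRepl_cons, if_neg (show ¬ ('<' :: pvBOLDr).isPrefixOf (c :: t) = true from hb)]
                have hnI : ¬ ('<' :: pvITALr).isPrefixOf
                    (c :: pvRepl '<' pvBOLDr ['*'] t) = true := by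
                  intro hp
                  simp only [List.isPrefixOf, Bool.and_eq_true, beq_iff_eq] at hp
                  obtain ⟨hc1, h2⟩ := hp
                  have h3 : pvITALr.isPrefixOf t = true :=
                    pvG '<' pvBOLDr '*' [] t.length pvITALr pvD1 t le_rfl h2
                  exact hi (show pvTokITALIC.isPrefixOf (c :: t) = true from by
                    simp only [show pvTokITALIC = '<' :: pvITALr from rfl, List.isPrefixOf,
                      Bool.and_eq_true, beq_iff_eq]
                    exact ⟨hc1, h3⟩)
                have e2 : pvRepl '<' pvITALr ['_'] (c :: pvRepl '<' pvBOLDr ['*'] t) =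
                    c :: pvRepl '<' pvITALr ['_'] (pvRepl '<' pvBOLDr ['*'] t) := by
                  rw [pvRepl_cons, if_neg hnI]
                have hnU : ¬ ('<' :: pvUNDr).isPrefixOf
                    (c :: pvRepl '<' pvITALr ['_'] (pvRepl '<' pvBOLDr ['*'] t)) = true := by
                  intro hp
                  simp only [List.isPrefixOf, Bool.and_eq_true, beq_iff_eq] at hp
                  obtain ⟨hc1, h2⟩ := hp
                  have h3 : pvUNDr.isPrefixOf (pvRepl '<' pvBOLDr ['*'] t) = true :=
                    pvG '<' pvITALr '_' [] (pvRepl '<' pvBOLDr ['*'] t).length pvUNDr pvD2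
                      (pvRepl '<' pvBOLDr ['*'] t) le_rfl h2
                  have h4 : pvUNDr.isPrefixOf t = true :=
                    pvG '<' pvBOLDr '*' [] t.length pvUNDr pvD3 t le_rfl h3
                  exact hund (show pvTokUNDERLINE.isPrefixOf (c :: t) = true from by
                    simp only [show pvTokUNDERLINE = '<' :: pvUNDr from rfl, List.isPrefixOf,
                      Bool.and_eq_true, beq_iff_eq]
                    exact ⟨hc1, h4⟩)
                have e3 : pvRepl '<' pvUNDr ['_','_']
                      (c :: pvRepl '<' pvITALr ['_'] (pvRepl '<' pvBOLDr ['*'] t)) =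
                    c :: pvRepl '<' pvUNDr ['_','_']
                      (pvRepl '<' pvITALr ['_'] (pvRepl '<' pvBOLDr ['*'] t)) := by
                  rw [pvRepl_cons, if_neg hnU]
                have hnS : ¬ ('<' :: pvSTRr).isPrefixOf
                    (c :: pvRepl '<' pvUNDr ['_','_']
                      (pvRepl '<' pvITALr ['_'] (pvRepl '<' pvBOLDr ['*'] t))) = true := by
                  intro hp
                  simp only [List.isPrefixOf, Bool.and_eq_true, beq_iff_eq] at hp
                  obtain ⟨hc1, h2⟩ := hp
                  have h3 : pvSTRr.isPrefixOf
                      (pvRepl '<' pvITALr ['_'] (pvRepl '<' pvBOLDr ['*'] t)) = true :=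
                    pvG '<' pvUNDr '_' ['_']
                      (pvRepl '<' pvITALr ['_'] (pvRepl '<' pvBOLDr ['*'] t)).length pvSTRr
                      pvD4 _ le_rfl h2
                  have h4 : pvSTRr.isPrefixOf (pvRepl '<' pvBOLDr ['*'] t) = true :=
                    pvG '<' pvITALr '_' [] (pvRepl '<' pvBOLDr ['*'] t).length pvSTRr pvD5
                      _ le_rfl h3
                  have h5 : pvSTRr.isPrefixOf t = true :=
                    pvG '<' pvBOLDr '*' [] t.length pvSTRr pvD6 t le_rfl h4
                  exact hs (show pvTokSTRIKE.isPrefixOf (c :: t) = true from by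
                    simp only [show pvTokSTRIKE = '<' :: pvSTRr from rfl, List.isPrefixOf,
                      Bool.and_eq_true, beq_iff_eq]
                    exact ⟨hc1, h5⟩)
                have e4 : pvRepl '<' pvSTRr ['~']
                      (c :: pvRepl '<' pvUNDr ['_','_']
                        (pvRepl '<' pvITALr ['_'] (pvRepl '<' pvBOLDr ['*'] t))) =
                    c :: pvRepl '<' pvSTRr ['~']
                      (pvRepl '<' pvUNDr ['_','_']
                        (pvRepl '<' pvITALr ['_'] (pvRepl '<' pvBOLDr ['*'] t))) := by
                  rw [pvRepl_cons, if_neg hnS]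
                have hnC : ¬ ('<' :: pvCODEr).isPrefixOf
                    (c :: pvRepl '<' pvSTRr ['~']
                      (pvRepl '<' pvUNDr ['_','_']
                        (pvRepl '<' pvITALr ['_'] (pvRepl '<' pvBOLDr ['*'] t)))) = true := by
                  intro hp
                  simp only [List.isPrefixOf, Bool.and_eq_true, beq_iff_eq] at hp
                  obtain ⟨hc1, h2⟩ := hp
                  have h3 : pvCODEr.isPrefixOf
                      (pvRepl '<' pvUNDr ['_','_']
                        (pvRepl '<' pvITALr ['_'] (pvRepl '<' pvBOLDr ['*'] t))) = true :=
                    pvG '<' pvSTRr '~' []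
                      (pvRepl '<' pvUNDr ['_','_']
                        (pvRepl '<' pvITALr ['_'] (pvRepl '<' pvBOLDr ['*'] t))).length pvCODEr
                      pvD7 _ le_rfl h2
                  have h4 : pvCODEr.isPrefixOf
                      (pvRepl '<' pvITALr ['_'] (pvRepl '<' pvBOLDr ['*'] t)) = true :=
                    pvG '<' pvUNDr '_' ['_']
                      (pvRepl '<' pvITALr ['_'] (pvRepl '<' pvBOLDr ['*'] t)).length pvCODEr
                      pvD8 _ le_rfl h3
                  have h5 : pvCODEr.isPrefixOf (pvRepl '<' pvBOLDr ['*'] t) = true :=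
                    pvG '<' pvITALr '_' [] (pvRepl '<' pvBOLDr ['*'] t).length pvCODEr pvD9
                      _ le_rfl h4
                  have h6 : pvCODEr.isPrefixOf t = true :=
                    pvG '<' pvBOLDr '*' [] t.length pvCODEr pvD10 t le_rfl h5
                  exact hc (show pvTokCODE.isPrefixOf (c :: t) = true from by
                    simp only [show pvTokCODE = '<' :: pvCODEr from rfl, List.isPrefixOf,
                      Bool.and_eq_true, beq_iff_eq]
                    exact ⟨hc1, h6⟩)
                have e5 : pvRepl '<' pvCODEr ['`']
                      (c :: pvRepl '<' pvSTRr ['~']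
                        (pvRepl '<' pvUNDr ['_','_']
                          (pvRepl '<' pvITALr ['_'] (pvRepl '<' pvBOLDr ['*'] t)))) =
                    c :: pvRepl '<' pvCODEr ['`']
                      (pvRepl '<' pvSTRr ['~']
                        (pvRepl '<' pvUNDr ['_','_']
                          (pvRepl '<' pvITALr ['_'] (pvRepl '<' pvBOLDr ['*'] t)))) := by
                  rw [pvRepl_cons, if_neg hnC]
                rw [e1, e2, e3, e4, e5, ih t (by simp at hl; omega), pvAltGo_cons,
                    if_neg hb, if_neg hi, if_neg hund, if_neg hs, if_neg hc]

-- ===== VERDICT (by name: the statement is the Claim_ definition above) =====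
theorem restore_preserved_markdown_spec : Claim_equal_restore_preserved_markdown := by
  intro text _
  unfold Spec_restore_preserved_markdown
  have hA : restore_preserved_markdown text =
      PySem.Str.replace (PySem.Str.replace (PySem.Str.replace (PySem.Str.replace
        (PySem.Str.replace text "<<<BOLD>>>" "*") "<<<ITALIC>>>" "_")
        "<<<UNDERLINE>>>" "__") "<<<STRIKE>>>" "~") "<<<CODE>>>" "`" := rfl
  rw [hA]
  unfold restore_preserved_markdown_alt
  conv_lhs => rw [← String.ofList_toList (s := PySem.Str.replace (PySem.Str.replace
    (PySem.Str.replace (PySem.Str.replace (PySem.Str.replace text "<<<BOLD>>>" "*")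
    "<<<ITALIC>>>" "_") "<<<UNDERLINE>>>" "__") "<<<STRIKE>>>" "~") "<<<CODE>>>" "`")]
  apply congrArg String.ofList
  simp only [PySem.Str.toList_replace]
  rw [show "<<<BOLD>>>".toList = '<' :: pvBOLDr from by decide,
      show "<<<ITALIC>>>".toList = '<' :: pvITALr from by decide,
      show "<<<UNDERLINE>>>".toList = '<' :: pvUNDr from by decide,
      show "<<<STRIKE>>>".toList = '<' :: pvSTRr from by decide,
      show "<<<CODE>>>".toList = '<' :: pvCODEr from by decide,
      show "*".toList = ['*'] from by decide,
      show "_".toList = ['_'] from by decide,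
      show "__".toList = ['_','_'] from by decide,
      show "~".toList = ['~'] from by decide,
      show "`".toList = ['`'] from by decide]
  simp only [pvChars_replace_eq]
  exact pvMain text.toList.length text.toList le_rfl
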